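-- pv_equiv track=rewrite | github.com/TimeB1729/codeforces | rated 1000/monsters.py | ourfunc
-- ===== SOURCE A (Python) =====
-- def ourfunc(t, test_cases):
--     results = []
--     for n, k, arr in test_cases:
--         a = [x%k if x%k != 0 else k for x in arr]
--         ord_ = list(range(n))
--         ord_.sort(key = lambda i: a[i], reverse=True)
--         res = [i+1 for i in ord_]
--
--         results.append(res)
--     return results
-- ===== SOURCE B (Python) =====
-- def ourfunc(t, test_cases):
--     def solve(n, k, arr):
--         buckets = {}
--         for i in range(n):
--             key = arr[i] % k
--             if key == 0:
--                 key = k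
--             buckets.setdefault(key, []).append(i + 1)
--         res = []
--         for key in sorted(buckets, reverse=True):
--             res += buckets[key]
--         return res
--     return [solve(n, k, arr) for n, k, arr in test_cases]
-- ===== Notes on version B (the rewrite author's own statement) =====
-- stated objective: alternative
-- what changed: Replaces the stable descending comparison sort of all indices by a single grouping pass that buckets indices per modular key in a dict (input order kept inside each bucket) and then concatenates the buckets over the distinct keys sorted descending.
import Mathlib
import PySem

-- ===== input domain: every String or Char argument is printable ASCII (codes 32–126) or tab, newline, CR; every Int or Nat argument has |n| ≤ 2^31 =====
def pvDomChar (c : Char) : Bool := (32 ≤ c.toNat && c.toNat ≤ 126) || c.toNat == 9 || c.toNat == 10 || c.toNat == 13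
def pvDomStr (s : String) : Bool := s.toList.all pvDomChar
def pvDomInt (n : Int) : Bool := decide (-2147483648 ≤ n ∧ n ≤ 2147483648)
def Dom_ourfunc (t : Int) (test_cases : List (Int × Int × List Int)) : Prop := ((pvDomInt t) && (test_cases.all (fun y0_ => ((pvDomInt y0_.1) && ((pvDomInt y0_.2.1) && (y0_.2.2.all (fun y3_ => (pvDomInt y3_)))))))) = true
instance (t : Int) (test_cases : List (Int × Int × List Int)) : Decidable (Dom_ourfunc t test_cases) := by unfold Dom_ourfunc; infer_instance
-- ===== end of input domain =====

-- B replaces the stable comparison sort of all indices by hash-grouping the indices per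
-- modular key and concatenating the groups in descending key order (only the distinct
-- keys are sorted); same return value on Pre_ (neither version mutates its arguments).

-- ===== PORT A =====
def ourfunc (t : Int) (test_cases : List (Int × Int × List Int)) : List (List Int) :=
  test_cases.foldl
    (fun results tc =>
      let n := tc.1
      let k := tc.2.1
      let arr := tc.2.2
      -- a = [x%k if x%k != 0 else k for x in arr]
      let a := arr.map (fun x => if PySem.Int.mod x k ≠ 0 then PySem.Int.mod x k else k)
      -- ord_ = list(range(n)); ord_.sort(key=lambda i: a[i], reverse=True)
      -- a[i] ported with default 0: exact under Pre_ (0 ≤ i < n ≤ len a)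
      let ord := PySem.List.sorted (PySem.List.pyRange 0 n 1) (fun i => PySem.List.pyGetD a i 0) true
      results ++ [ord.map (fun i => i + 1)])
    []

-- ===== PORT B =====
def ourfuncAltCase (tc : Int × Int × List Int) : List Int :=
  let n := tc.1
  let k := tc.2.1
  let arr := tc.2.2
  -- for i in range(n): key = arr[i] % k; if key == 0: key = k; buckets.setdefault(key, []).append(i+1)
  -- (setdefault(key, []).append(v) = Dict.modify key [] (· ++ [v]); arr[i] exact under Pre_)
  let buckets : PySem.Dict Int (List Int) :=
    (PySem.List.pyRange 0 n 1).foldl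
      (fun d i =>
        d.modify (if PySem.Int.mod (PySem.List.pyGetD arr i 0) k = 0 then k
                  else PySem.Int.mod (PySem.List.pyGetD arr i 0) k) [] (fun v => v ++ [i + 1]))
      PySem.Dict.empty
  -- res = []; for key in sorted(buckets, reverse=True): res += buckets[key]
  (PySem.List.sorted buckets.keys (fun c => c) true).foldl
    (fun res key => res ++ buckets.getD key []) []

def ourfunc_alt (t : Int) (test_cases : List (Int × Int × List Int)) : List (List Int) :=
  test_cases.map ourfuncAltCase

-- ===== PRECONDITION & SPEC =====
-- Pre_ excludes exactly the inputs on which A raises: a test case with k = 0 and a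
-- non-empty arr (ZeroDivisionError in the comprehension), or with n > len(arr)
-- (IndexError in the sort key).
def Pre_ourfunc (t : Int) (test_cases : List (Int × Int × List Int)) : Prop :=
  ∀ tc ∈ test_cases, (tc.2.1 ≠ 0 ∨ tc.2.2 = []) ∧ tc.1 ≤ (tc.2.2.length : Int)
instance (t : Int) (test_cases : List (Int × Int × List Int)) : Decidable (Pre_ourfunc t test_cases) := by unfold Pre_ourfunc; infer_instance

def pvWitness_ourfunc : Int × (List (Int × Int × List Int)) := (1, [(3, 2, [5, 4, 7])])

def Spec_ourfunc (t : Int) (test_cases : List (Int × Int × List Int)) (out : List (List Int)) : Prop := out = ourfunc_alt t test_cases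
instance (t : Int) (test_cases : List (Int × Int × List Int)) (out : List (List Int)) : Decidable (Spec_ourfunc t test_cases out) := by unfold Spec_ourfunc; infer_instance

-- ===== CLAIM (what is proved, stated in full; the proofs are below) =====
def Claim_equal_ourfunc : Prop := ∀ (t : Int) (test_cases : List (Int × Int × List Int)), Dom_ourfunc t test_cases → Pre_ourfunc t test_cases → Spec_ourfunc t test_cases (ourfunc t test_cases)

-- ===== LEMMAS AND PROOFS =====

lemma insertBy_nil {α : Type} (before : α → α → Bool) (x : α) :
    PySem.List.insertBy before x [] = [x] := rfl

lemma insertBy_cons {α : Type} (before : α → α → Bool) (x y : α) (ys : List α) :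
    PySem.List.insertBy before x (y :: ys) =
      if before x y then x :: y :: ys else y :: PySem.List.insertBy before x ys := rfl

lemma insertBy_skip {α : Type} (before : α → α → Bool) (x : α) (ys zs : List α)
    (h : ∀ y ∈ ys, before x y = false) :
    PySem.List.insertBy before x (ys ++ zs) = ys ++ PySem.List.insertBy before x zs := by
  induction ys with
  | nil => simp
  | cons y t ih =>
    rw [List.cons_append, insertBy_cons, if_neg (by simp [h y (by simp)]),
      ih (fun z hz => h z (by simp [hz])), List.cons_append]

lemma insertBy_front {α : Type} (before : α → α → Bool) (x : α) (ys : List α)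
    (h : ∀ y ∈ ys, before x y = true) :
    PySem.List.insertBy before x ys = x :: ys := by
  cases ys with
  | nil => rfl
  | cons y t => rw [insertBy_cons, if_pos (h y (by simp))]

lemma flatMap_congr_mem {α β : Type} (l : List α) (f g : α → List β)
    (h : ∀ a ∈ l, f a = g a) : l.flatMap f = l.flatMap g := by
  induction l with
  | nil => rfl
  | cons a t ih =>
    rw [List.flatMap_cons, List.flatMap_cons, h a (by simp), ih (fun b hb => h b (by simp [hb]))]

-- inserting x into a concatenation of strictly-descending key groups, x's key present:
-- x lands at the end of its group
lemma insert_group_mem (f : Int → Int) (x : Int) :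
    ∀ (cs : List Int) (g : Int → List Int), cs.Pairwise (· > ·) →
      (∀ c ∈ cs, ∀ y ∈ g c, f y = c) → f x ∈ cs →
      PySem.List.insertBy (fun a b => decide (f b < f a)) x (cs.flatMap g)
        = cs.flatMap (fun c => g c ++ if f x == c then [x] else []) := by
  intro cs
  induction cs with
  | nil => intro g _ _ hm; simp at hm
  | cons c cs ih =>
    intro g hp hg hm
    have hcs : ∀ b ∈ cs, b < c := fun b hb => (List.pairwise_cons.mp hp).1 b hb
    have hp' := (List.pairwise_cons.mp hp).2
    rw [List.flatMap_cons, List.flatMap_cons]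
    by_cases hc : f x = c
    · -- x's group is the head group: x is appended right after it
      have hskip : ∀ y ∈ g c, decide (f y < f x) = false := by
        intro y hy
        simp only [hg c (by simp) y hy, hc, decide_eq_false_iff_not]; omega
      rw [insertBy_skip _ _ _ _ hskip]
      have hfront : ∀ y ∈ cs.flatMap g, decide (f y < f x) = true := by
        intro y hy
        obtain ⟨c', hc', hy'⟩ := List.mem_flatMap.mp hy
        have h1 := hg c' (by simp [hc']) y hy'
        have h2 := hcs c' hc'
        simp only [h1, decide_eq_true_eq]; omega
      rw [insertBy_front _ _ _ hfront]
      have htail : cs.flatMap (fun c' => g c' ++ if f x == c' then [x] else []) = cs.flatMap g := by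
        apply flatMap_congr_mem
        intro c' hc'
        have h1 : f x ≠ c' := by have := hcs c' hc'; omega
        simp [h1]
      rw [htail, if_pos (by simp [hc])]
      simp
    · -- x's group is deeper: the whole head group is skipped
      have hm' : f x ∈ cs := by
        rcases List.mem_cons.mp hm with h | h
        · exact absurd h hc
        · exact h
      have hlt : f x < c := hcs _ hm'
      have hskip : ∀ y ∈ g c, decide (f y < f x) = false := by
        intro y hy
        simp only [hg c (by simp) y hy, decide_eq_false_iff_not]; omega
      rw [insertBy_skip _ _ _ _ hskip,
        ih g hp' (fun c' hc' y hy => hg c' (by simp [hc']) y hy) hm',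
        if_neg (by simp [hc])]
      simp

-- inserting x whose key is new: the singleton group [x] appears exactly where insertBy
-- places the new key in the descending key list
lemma insert_group_not_mem (f : Int → Int) (x : Int) :
    ∀ (cs : List Int) (g : Int → List Int), cs.Pairwise (· > ·) →
      (∀ c ∈ cs, ∀ y ∈ g c, f y = c) → f x ∉ cs → g (f x) = [] →
      PySem.List.insertBy (fun a b => decide (f b < f a)) x (cs.flatMap g)
        = (PySem.List.insertBy (fun a b => decide ((b : Int) < a)) (f x) cs).flatMap
            (fun c => g c ++ if f x == c then [x] else []) := by
  intro cs
  induction cs with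
  | nil =>
    intro g _ _ _ hgx
    rw [List.flatMap_nil, insertBy_nil, insertBy_nil]
    simp [hgx]
  | cons c cs ih =>
    intro g hp hg hm hgx
    have hcs : ∀ b ∈ cs, b < c := fun b hb => (List.pairwise_cons.mp hp).1 b hb
    have hp' := (List.pairwise_cons.mp hp).2
    have hne : f x ≠ c := fun h => hm (by simp [h])
    by_cases hlt : c < f x
    · -- the new key goes in front of everything
      rw [insertBy_cons (fun a b => decide ((b : Int) < a)), if_pos (by simpa using hlt)]
      have hfront : ∀ y ∈ (c :: cs).flatMap g, decide (f y < f x) = true := by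
        intro y hy
        obtain ⟨c', hc', hy'⟩ := List.mem_flatMap.mp hy
        have h1 := hg c' hc' y hy'
        have h2 : c' ≤ c := by
          rcases List.mem_cons.mp hc' with h | h
          · omega
          · have := hcs c' h; omega
        simp only [h1, decide_eq_true_eq]; omega
      rw [insertBy_front _ _ _ hfront]
      have htail : (c :: cs).flatMap (fun c' => g c' ++ if f x == c' then [x] else [])
          = (c :: cs).flatMap g := by
        apply flatMap_congr_mem
        intro c' hc'
        have h1 : f x ≠ c' := by
          rcases List.mem_cons.mp hc' with h | h
          · omega
          · have := hcs c' h; omega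
        simp [h1]
      conv_rhs => rw [List.flatMap_cons]
      rw [htail, hgx]
      simp
    · -- the new key goes past the head group
      have hlt' : f x < c := by omega
      rw [insertBy_cons (fun a b => decide ((b : Int) < a)), if_neg (by simpa using hlt)]
      have hskip : ∀ y ∈ g c, decide (f y < f x) = false := by
        intro y hy
        simp only [hg c (by simp) y hy, decide_eq_false_iff_not]; omega
      rw [List.flatMap_cons, insertBy_skip _ _ _ _ hskip,
        ih g hp' (fun c' hc' y hy => hg c' (by simp [hc']) y hy) (fun h => hm (by simp [h])) hgx,
        List.flatMap_cons, if_neg (by simp [hne])]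
      simp

-- Python's stable descending sort = group the elements by key, then concatenate the
-- groups by strictly descending key
lemma stable_group (l : List Int) (f : Int → Int) :
    PySem.List.sorted l f true
      = (PySem.List.sorted (PySem.Set.ofList (l.map f)) (fun c => c) true).flatMap
          (fun c => l.filter (fun y => f y == c)) := by
  induction l using List.reverseRecOn with
  | nil => rfl
  | append_singleton l x ih =>
    have hK : (PySem.Set.ofList (l.map f)).Nodup := PySem.Set.nodup_ofList _
    have hpw : (PySem.List.sorted (PySem.Set.ofList (l.map f)) (fun c => c) true).Pairwise (· > ·) := by
      have h1 := PySem.List.sorted_pairwise_rev (PySem.Set.ofList (l.map f)) (fun c => c)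
      have h2 : (PySem.List.sorted (PySem.Set.ofList (l.map f)) (fun c => c) true).Nodup :=
        ((PySem.List.sorted_perm (PySem.Set.ofList (l.map f)) (fun c => c) true).nodup_iff).mpr hK
      exact (List.Pairwise.and h1 h2).imp (fun h => lt_of_le_of_ne h.1 (Ne.symm h.2))
    have hg : ∀ c ∈ PySem.List.sorted (PySem.Set.ofList (l.map f)) (fun c => c) true,
        ∀ y ∈ l.filter (fun y => f y == c), f y = c := by
      intro c _ y hy
      simpa using (List.mem_filter.mp hy).2
    rw [PySem.List.sorted_rev_eq_foldl_insertBy, List.foldl_append, List.foldl_cons,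
      List.foldl_nil, ← PySem.List.sorted_rev_eq_foldl_insertBy, ih,
      List.map_append, List.map_singleton, PySem.Set.ofList_append_singleton]
    by_cases hmem : f x ∈ PySem.Set.ofList (l.map f)
    · rw [PySem.Set.add_of_mem hmem]
      have hmc : f x ∈ PySem.List.sorted (PySem.Set.ofList (l.map f)) (fun c => c) true :=
        (PySem.List.mem_sorted _ _ _ _).mpr hmem
      rw [insert_group_mem f x _ _ hpw hg hmc]
      apply flatMap_congr_mem
      intro c _
      rw [List.filter_append]
      by_cases h : f x = c <;> simp [h]
    · rw [PySem.Set.add_of_not_mem hmem]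
      have hgx : l.filter (fun y => f y == f x) = [] := by
        rw [List.filter_eq_nil_iff]
        intro y hy
        simp only [beq_iff_eq]
        intro hfy
        refine hmem ?_
        rw [PySem.Set.mem_ofList]
        exact List.mem_map.mpr ⟨y, hy, hfy⟩
      have hmc : f x ∉ PySem.List.sorted (PySem.Set.ofList (l.map f)) (fun c => c) true :=
        fun h => hmem ((PySem.List.mem_sorted _ _ _ _).mp h)
      rw [insert_group_not_mem f x _ _ hpw hg hmc hgx,
        PySem.List.sorted_rev_eq_foldl_insertBy (PySem.Set.ofList (l.map f) ++ [f x]),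
        List.foldl_append, List.foldl_cons, List.foldl_nil,
        ← PySem.List.sorted_rev_eq_foldl_insertBy]
      apply flatMap_congr_mem
      intro c _
      rw [List.filter_append]
      by_cases h : f x = c <;> simp [h]

-- the per-test-case equality
lemma case_eq (n k : Int) (arr : List Int) (hn : n ≤ (arr.length : Int)) :
    (PySem.List.sorted (PySem.List.pyRange 0 n 1)
        (fun i => PySem.List.pyGetD
          (arr.map (fun x => if PySem.Int.mod x k ≠ 0 then PySem.Int.mod x k else k)) i 0) true).map
      (fun i => i + 1)
      = ourfuncAltCase (n, k, arr) := by
  show _ =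
    (PySem.List.sorted
      ((PySem.List.pyRange 0 n 1).foldl
        (fun d i =>
          d.modify (if PySem.Int.mod (PySem.List.pyGetD arr i 0) k = 0 then k
                    else PySem.Int.mod (PySem.List.pyGetD arr i 0) k) [] (fun v => v ++ [i + 1]))
        PySem.Dict.empty).keys (fun c => c) true).foldl
      (fun res key =>
        res ++ ((PySem.List.pyRange 0 n 1).foldl
          (fun d i =>
            d.modify (if PySem.Int.mod (PySem.List.pyGetD arr i 0) k = 0 then k
                      else PySem.Int.mod (PySem.List.pyGetD arr i 0) k) [] (fun v => v ++ [i + 1]))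
          PySem.Dict.empty).getD key []) []
  have hkey : ∀ i ∈ PySem.List.pyRange 0 n 1,
      PySem.List.pyGetD (arr.map (fun x => if PySem.Int.mod x k ≠ 0 then PySem.Int.mod x k else k)) i 0
        = (if PySem.Int.mod (PySem.List.pyGetD arr i 0) k = 0 then k
           else PySem.Int.mod (PySem.List.pyGetD arr i 0) k) := by
    intro i hi
    obtain ⟨h0, h1⟩ := PySem.List.mem_pyRange_one.mp hi
    have hlen : i < ((arr.map (fun x => if PySem.Int.mod x k ≠ 0 then PySem.Int.mod x k else k)).length : Int) := by
      simp only [List.length_map]; omega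
    have hlen' : i < (arr.length : Int) := by omega
    rw [PySem.List.pyGetD_eq_getElem _ _ h0 hlen, PySem.List.pyGetD_eq_getElem _ _ h0 hlen',
      List.getElem_map]
    by_cases h : PySem.Int.mod arr[i.toNat] k = 0 <;> simp [h]
  -- the dict as a fold over (key, value) pairs
  have hfold : ((PySem.List.pyRange 0 n 1).foldl
        (fun d i =>
          d.modify (if PySem.Int.mod (PySem.List.pyGetD arr i 0) k = 0 then k
                    else PySem.Int.mod (PySem.List.pyGetD arr i 0) k) [] (fun v => v ++ [i + 1]))
        PySem.Dict.empty)
      = ((PySem.List.pyRange 0 n 1).map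
          (fun i => ((if PySem.Int.mod (PySem.List.pyGetD arr i 0) k = 0 then k
                      else PySem.Int.mod (PySem.List.pyGetD arr i 0) k), i + 1))).foldl
          (fun d p => d.modify p.1 [] (fun v => v ++ [p.2])) PySem.Dict.empty := by
    rw [List.foldl_map]
  have hkeys : ((PySem.List.pyRange 0 n 1).foldl
        (fun d i =>
          d.modify (if PySem.Int.mod (PySem.List.pyGetD arr i 0) k = 0 then k
                    else PySem.Int.mod (PySem.List.pyGetD arr i 0) k) [] (fun v => v ++ [i + 1]))
        PySem.Dict.empty).keys
      = PySem.Set.ofList ((PySem.List.pyRange 0 n 1).map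
          (fun i => if PySem.Int.mod (PySem.List.pyGetD arr i 0) k = 0 then k
                    else PySem.Int.mod (PySem.List.pyGetD arr i 0) k)) := by
    rw [PySem.Dict.keys_foldl_modify_key (f := fun _ i => fun v => v ++ [i + 1])]
    simp [PySem.Dict.keys_empty, PySem.Set.update_nil_left]
  have hgetD : ∀ c, ((PySem.List.pyRange 0 n 1).foldl
        (fun d i =>
          d.modify (if PySem.Int.mod (PySem.List.pyGetD arr i 0) k = 0 then k
                    else PySem.Int.mod (PySem.List.pyGetD arr i 0) k) [] (fun v => v ++ [i + 1]))
        PySem.Dict.empty).getD c []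
      = ((PySem.List.pyRange 0 n 1).filter
          (fun i => (if PySem.Int.mod (PySem.List.pyGetD arr i 0) k = 0 then k
                     else PySem.Int.mod (PySem.List.pyGetD arr i 0) k) == c)).map (fun i => i + 1) := by
    intro c
    rw [hfold, PySem.Dict.getD_foldl_modify_append]
    simp [List.filter_map, List.map_map, Function.comp_def]
  rw [PySem.List.foldl_append_eq_flatMap, List.nil_append, hkeys,
    stable_group, List.map_flatMap,
    List.map_congr_left hkey]
  apply flatMap_congr_mem
  intro c _
  rw [hgetD c]
  rw [List.filter_congr (fun i hi => by rw [hkey i hi])]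

-- ===== VERDICT (by name: the statement is the Claim_ definition above) =====
theorem ourfunc_spec : Claim_equal_ourfunc := by
  intro t tcs _ hpre
  show ourfunc t tcs = ourfunc_alt t tcs
  unfold ourfunc ourfunc_alt
  rw [PySem.List.foldl_append_singleton_eq_map, List.nil_append]
  apply List.map_congr_left
  intro tc htc
  obtain ⟨hk, hn⟩ := hpre tc htc
  simpa using case_eq tc.1 tc.2.1 tc.2.2 hn
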